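-- pv_equiv track=rewrite | github.com/eliottcassidy2000/math | 04-computation/intergroup_analysis.py | omega3_poly
-- ===== SOURCE A (Python) =====
-- def omega3_poly(c3):
--     """Build Omega_3 and compute independence polynomial."""
--     m = len(c3)
--     if m == 0:
--         return [1]
--     vsets = [frozenset(c) for c in c3]
--     adj = {}
--     for i in range(m):
--         adj[i] = frozenset(j for j in range(m) if j != i and vsets[i] & vsets[j])
--     memo = {}
--     def solve(verts):
--         if verts in memo:
--             return memo[verts]
--         if not verts:
--             return [1]
--         v = max(verts, key=lambda u: len(adj[u] & verts))
--         p1 = solve(verts - {v})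
--         p2 = solve(verts - (adj[v] & verts) - {v})
--         maxlen = max(len(p1), len(p2) + 1)
--         result = [0] * maxlen
--         for i in range(len(p1)):
--             result[i] += p1[i]
--         for i in range(len(p2)):
--             result[i + 1] += p2[i]
--         memo[verts] = result
--         return result
--     return solve(frozenset(range(m)))
-- ===== SOURCE B (Python) =====
-- def omega3_poly(c3):
--     """Build Omega_3 and compute independence polynomial.
--
--     Sequential DP: walk the vertices in index order keeping the set of
--     later vertices blocked by earlier choices, memoised on (index, blocked).
--     """
--     m = len(c3)
--     vsets = [set(c) for c in c3]
--     # forward neighbours only: j > i sharing an element with i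
--     nbrs = [frozenset(j for j in range(i + 1, m) if vsets[i] & vsets[j])
--             for i in range(m)]
--
--     def padd(p, q):
--         # p + x*q, trimmed to max(len(p), len(q)+1)
--         n = max(len(p), len(q) + 1)
--         return [(p[k] if k < len(p) else 0) +
--                 (q[k - 1] if 1 <= k <= len(q) else 0) for k in range(n)]
--
--     memo = {}
--
--     def poly(i, blocked):
--         if i == m:
--             return [1]
--         key = (i, blocked)
--         if key in memo:
--             return memo[key]
--         res = poly(i + 1, blocked - {i})
--         if i not in blocked:
--             res = padd(res, poly(i + 1, blocked | nbrs[i]))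
--         memo[key] = res
--         return res
--
--     return poly(0, frozenset())
-- ===== Notes on version B (the rewrite author's own statement) =====
-- stated objective: alternative
-- what changed: Replaces A's memoised recurrence that repeatedly picks a maximum-degree vertex of the remaining vertex set and branches on it with a sequential DP that walks the vertices in index order, threading the set of later vertices blocked by the choices made so far (memoised on (index, blocked)), and merges the skip/take polynomials with a zip-style comprehension instead of A's in-place index loops.
import Mathlib
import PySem

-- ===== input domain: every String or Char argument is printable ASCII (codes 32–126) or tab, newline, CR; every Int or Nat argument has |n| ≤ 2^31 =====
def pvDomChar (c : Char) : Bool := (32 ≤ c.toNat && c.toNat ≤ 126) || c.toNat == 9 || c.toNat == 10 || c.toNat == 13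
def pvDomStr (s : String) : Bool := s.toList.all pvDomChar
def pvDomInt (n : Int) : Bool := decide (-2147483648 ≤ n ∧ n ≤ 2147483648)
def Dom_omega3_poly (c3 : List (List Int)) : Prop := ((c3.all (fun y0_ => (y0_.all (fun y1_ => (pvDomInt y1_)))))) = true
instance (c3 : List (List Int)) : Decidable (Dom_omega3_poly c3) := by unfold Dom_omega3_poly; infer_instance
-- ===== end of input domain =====

-- B replaces A's memoised branch-on-max-degree deletion recurrence by a sequential DP over the
-- vertex indices that threads the set of vertices blocked by earlier choices (objective:
-- alternative; a timing run measured B faster by a constant factor on its generated inputs).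

-- ===== PORT A =====
-- Python truthiness of `a & b` on two sets: nonempty intersection.
def pvInter (a b : List Int) : Bool := a.any (fun x => b.contains x)

-- `max(xs_with_first_best, key=key)`: keep the first element whose key is strictly maximal.
-- (A iterates a frozenset here, whose order is a CPython artefact; the polynomial returned is
-- pivot-independent — that is what the equivalence proof below establishes — so the port scans
-- in list order.)
def pvMaxBy (key : Nat → Nat) : List Nat → Nat → Nat
  | [], best => best
  | x :: xs, best => pvMaxBy key xs (if key best < key x then x else best)

-- the chosen pivot is the seed or a member of the list (needed for termination of `solveA`)
lemma pvMaxBy_mem (key : Nat → Nat) : ∀ (l : List Nat) (best : Nat),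
    pvMaxBy key l best = best ∨ pvMaxBy key l best ∈ l
  | [], _ => Or.inl rfl
  | x :: xs, best => by
    simp only [pvMaxBy]
    rcases pvMaxBy_mem key xs (if key best < key x then x else best) with h | h
    · rw [h]; split_ifs with hx
      · exact Or.inr (List.mem_cons_self ..)
      · exact Or.inl rfl
    · exact Or.inr (List.mem_cons_of_mem _ h)

-- the adjacency dict A tabulates: `adj[i] = frozenset(j for j in range(m) if j != i and vsets[i] & vsets[j])`
def vsetsOf (c3 : List (List Int)) : List (PySem.Set Int) := c3.map (fun c => PySem.Set.ofList c)
def adjA (c3 : List (List Int)) : Nat → List Nat := fun i =>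
  (List.range c3.length).filter
    (fun j => (j != i) && pvInter ((vsetsOf c3).getD i []) ((vsetsOf c3).getD j []))

-- A's pivot: `max(verts, key=lambda u: len(adj[u] & verts))` on verts = w :: ws
def pivotA (adj : Nat → List Nat) (w : Nat) (ws : List Nat) : Nat :=
  pvMaxBy (fun u => ((adj u).filter (fun j => (w :: ws).contains j)).length) ws w

lemma pivotA_mem (adj : Nat → List Nat) (w : Nat) (ws : List Nat) : pivotA adj w ws ∈ w :: ws := by
  unfold pivotA
  rcases pvMaxBy_mem (fun u => ((adj u).filter (fun j => (w :: ws).contains j)).length) ws w with h | h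
  · rw [h]; exact List.mem_cons_self ..
  · exact List.mem_cons_of_mem _ h

-- A's result-building paragraph: `result = [0]*maxlen` and the two in-place add loops
def mergeListsA (p1 p2 : List Int) : List Int :=
  let maxlen := max p1.length (p2.length + 1)
  let r0 := List.replicate maxlen (0 : Int)
  let r1 := (List.range p1.length).foldl (fun r i => r.set i (r.getD i 0 + p1.getD i 0)) r0
  (List.range p2.length).foldl (fun r i => r.set (i + 1) (r.getD (i + 1) 0 + p2.getD i 0)) r1

-- A's `solve`, without the memo dictionary (the memo is value-transparent caching: it returns
-- exactly what the recomputation would); the locals `v` (pivot) and `nb` (= adj[v] & verts)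
-- are written inline via `pivotA`.
def solveA (adj : Nat → List Nat) : (verts : List Nat) → List Int
  | [] => [1]
  | w :: ws =>
    mergeListsA
      (solveA adj ((w :: ws).filter (fun u => u != pivotA adj w ws)))
      (solveA adj ((w :: ws).filter (fun u =>
        !((adj (pivotA adj w ws)).filter (fun j => (w :: ws).contains j)).contains u
          && (u != pivotA adj w ws))))
  termination_by verts => verts.length
  decreasing_by
  all_goals
    apply List.length_filter_lt_length_iff_exists.mpr
    refine ⟨pivotA adj w ws, pivotA_mem adj w ws, ?_⟩
    intro hcontr
    rw [show ((pivotA adj w ws : ℕ) != pivotA adj w ws) = false from bne_self_eq_false _] at hcontr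
    try rw [Bool.and_false] at hcontr
    exact absurd hcontr Bool.false_ne_true

def omega3_poly (c3 : List (List Int)) : List Int :=
  if c3.length = 0 then [1]
  else solveA (adjA c3) (List.range c3.length)

-- ===== PORT B =====
-- `padd p q` = p + x·q, as in Source B: one comprehension over range(max(len p, len q + 1)).
def pvPadd (p q : List Int) : List Int :=
  (List.range (max p.length (q.length + 1))).map
    (fun k => p.getD k 0 + if 1 ≤ k ∧ k ≤ q.length then q.getD (k - 1) 0 else 0)

-- forward neighbours of i: `frozenset(j for j in range(i+1, m) if vsets[i] & vsets[j])`
def nbrsB (c3 : List (List Int)) : Nat → List Nat := fun i =>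
  PySem.Set.ofList ((List.range c3.length).filter
    (fun j => (decide (i < j)) && pvInter ((vsetsOf c3).getD i []) ((vsetsOf c3).getD j [])))

-- Source B's `poly(i, blocked)` without the memo dictionary (value-transparent caching); Source B's
-- `res` binding is inlined (the skip-branch call appears once per branch).
-- Python tests `i == m`; `m ≤ i` is the totality guard (calls only ever reach i ≤ m).
def polyB (nbrs : Nat → List Nat) (m : Nat) : (i : Nat) → (blocked : PySem.Set Nat) → List Int :=
  fun i blocked =>
    if m ≤ i then [1]
    else
      if blocked.contains i then polyB nbrs m (i + 1) (PySem.Set.diff blocked (PySem.Set.ofList [i]))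
      else pvPadd (polyB nbrs m (i + 1) (PySem.Set.diff blocked (PySem.Set.ofList [i])))
        (polyB nbrs m (i + 1) (PySem.Set.union blocked (nbrs i)))
  termination_by i _ => m - i
  decreasing_by all_goals omega

def omega3_poly_alt (c3 : List (List Int)) : List Int :=
  polyB (nbrsB c3) c3.length 0 []

-- ===== PRECONDITION & SPEC =====
def Spec_omega3_poly (c3 : List (List Int)) (out : List Int) : Prop := out = omega3_poly_alt c3
instance (c3 : List (List Int)) (out : List Int) : Decidable (Spec_omega3_poly c3 out) := by unfold Spec_omega3_poly; infer_instance

-- ===== CLAIM (what is proved, stated in full; the proofs are below) =====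
def Claim_equal_omega3_poly : Prop := ∀ (c3 : List (List Int)), Dom_omega3_poly c3 → Spec_omega3_poly c3 (omega3_poly c3)

-- ===== LEMMAS AND PROOFS =====

-- ---- the common mathematical object: the independence polynomial of the set-intersection graph ----

-- adjacency of vertices i and j (exactly A's membership test `j ∈ adj[i]`, minus the range bound)
def AdjB (c3 : List (List Int)) (i j : Nat) : Bool :=
  (j != i) && pvInter ((vsetsOf c3).getD i []) ((vsetsOf c3).getD j [])

-- t is an independent set
def IndB (c3 : List (List Int)) (t : Finset ℕ) : Bool :=
  decide (∀ i ∈ t, ∀ j ∈ t, AdjB c3 i j = false)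

-- number of subsets t of s with P t and |t| = k
def cntB (s : Finset ℕ) (P : Finset ℕ → Bool) (k : ℕ) : ℕ :=
  (s.powerset.filter (fun t => P t = true ∧ t.card = k)).card

-- largest size of a subset of s with P
def maxB (s : Finset ℕ) (P : Finset ℕ → Bool) : ℕ :=
  (s.powerset.filter (fun t => P t = true)).sup Finset.card

-- the counting polynomial of the family {t ⊆ s | P t}, as a coefficient list
def histB (s : Finset ℕ) (P : Finset ℕ → Bool) : List Int :=
  (List.range (maxB s P + 1)).map (fun k => (cntB s P k : Int))

lemma pvInter_comm (a b : List Int) : pvInter a b = pvInter b a := by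
  apply Bool.eq_iff_iff.mpr
  simp only [pvInter, List.any_eq_true, List.contains_iff_mem]
  tauto

lemma AdjB_symm (c3 : List (List Int)) (i j : Nat) : AdjB c3 i j = AdjB c3 j i := by
  unfold AdjB
  rw [pvInter_comm]
  apply Bool.eq_iff_iff.mpr
  simp only [Bool.and_eq_true, bne_iff_ne, ne_eq]
  tauto

lemma AdjB_self (c3 : List (List Int)) (i : Nat) : AdjB c3 i i = false := by
  simp [AdjB]

lemma IndB_insert (c3 : List (List Int)) (v : ℕ) (t : Finset ℕ) :
    IndB c3 (insert v t) = (IndB c3 t && decide (∀ u ∈ t, AdjB c3 v u = false)) := by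
  apply Bool.eq_iff_iff.mpr
  simp only [IndB, Bool.and_eq_true, decide_eq_true_eq, Finset.mem_insert]
  constructor
  · intro h
    exact ⟨fun a ha b hb => h a (Or.inr ha) b (Or.inr hb),
           fun u hu => h v (Or.inl rfl) u (Or.inr hu)⟩
  · rintro ⟨h1, h2⟩ a ha b hb
    rcases ha with rfl | ha <;> rcases hb with rfl | hb
    · exact AdjB_self c3 _
    · exact h2 b hb
    · rw [AdjB_symm]; exact h2 a ha
    · exact h1 a ha b hb


-- ---- the in-place add loops of A's merge ----

lemma getD_set (l : List Int) (i k : ℕ) (x d : Int) :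
    (l.set i x).getD k d = if i = k ∧ k < l.length then x else l.getD k d := by
  by_cases h : i = k ∧ k < l.length
  · obtain ⟨rfl, hk⟩ := h; simp [List.getD, hk]
  · rw [if_neg h]
    rcases Decidable.not_and_iff_not_or_not.mp h with h1 | h2
    · simp [List.getD, h1]
    · have h3 : l.length ≤ k := Nat.le_of_not_lt h2
      rw [List.getD_eq_default _ _ (by simpa using h3), List.getD_eq_default _ _ h3]

lemma foldl_set_add (q : List Int) (off : ℕ) : ∀ (n : ℕ), n ≤ q.length → ∀ (r : List Int),
    ((List.range n).foldl (fun r i => r.set (i + off) (r.getD (i + off) 0 + q.getD i 0)) r).length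
      = r.length ∧
    ∀ k, ((List.range n).foldl (fun r i => r.set (i + off) (r.getD (i + off) 0 + q.getD i 0)) r).getD k 0
      = r.getD k 0 + (if off ≤ k ∧ k < off + n ∧ k < r.length then q.getD (k - off) 0 else 0)
  | 0, _, r => by
    constructor
    · simp
    · intro k; simp only [List.range_zero, List.foldl_nil]
      rw [if_neg (by omega)]; ring
  | n+1, hn, r => by
    obtain ⟨ihlen, ihget⟩ := foldl_set_add q off n (by omega) r
    rw [List.range_succ, List.foldl_append]
    simp only [List.foldl_cons, List.foldl_nil]
    constructor
    · rw [List.length_set, ihlen]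
    · intro k
      simp only [getD_set, ihlen, ihget]
      by_cases hk : n + off = k ∧ k < r.length
      · obtain ⟨h1, hkr⟩ := hk
        subst h1
        rw [if_pos ⟨rfl, hkr⟩, if_neg (by omega), if_pos (by omega)]
        rw [Nat.add_sub_cancel]
        ring
      · rw [if_neg hk]
        by_cases hc : off ≤ k ∧ k < off + n ∧ k < r.length
        · rw [if_pos hc, if_pos (by omega)]
        · rw [if_neg hc, if_neg (by omega)]

lemma mergeA_loops_eq_pvPadd (p1 p2 : List Int) :
    ((List.range p2.length).foldl (fun r i => r.set (i + 1) (r.getD (i + 1) 0 + p2.getD i 0))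
      ((List.range p1.length).foldl (fun r i => r.set i (r.getD i 0 + p1.getD i 0))
        (List.replicate (max p1.length (p2.length + 1)) (0 : Int))))
      = pvPadd p1 p2 := by
  have hfun : (fun (r : List Int) (i : ℕ) => r.set i (r.getD i 0 + p1.getD i 0))
      = (fun (r : List Int) (i : ℕ) => r.set (i + 0) (r.getD (i + 0) 0 + p1.getD i 0)) := by
    funext r i; simp
  rw [hfun]
  set L := max p1.length (p2.length + 1) with hL
  set r0 := List.replicate L (0 : Int) with hr0
  have hr0len : r0.length = L := by simp [hr0]
  have hr0get : ∀ k, r0.getD k 0 = 0 := by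
    intro k; simp [hr0, List.getD, List.getElem?_replicate]; split <;> simp
  obtain ⟨h1len, h1get⟩ := foldl_set_add p1 0 p1.length le_rfl r0
  set r1 := (List.range p1.length).foldl
    (fun r i => r.set (i + 0) (r.getD (i + 0) 0 + p1.getD i 0)) r0 with hr1
  obtain ⟨h2len, h2get⟩ := foldl_set_add p2 1 p2.length le_rfl r1
  have hr1get : ∀ k, r1.getD k 0 = p1.getD k 0 := by
    intro k
    rw [h1get k, hr0get, hr0len]
    by_cases hk : k < p1.length
    · rw [if_pos (by omega)]; simp
    · rw [if_neg (by omega), List.getD_eq_default _ _ (by omega)]; simp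
  apply List.ext_getElem
  · rw [h2len, h1len, hr0len]; simp [pvPadd, hL]
  · intro k hk1 hk2
    have hkL : k < L := by rw [h2len, h1len, hr0len] at hk1; exact hk1
    rw [List.getElem_eq_getD (fallback := 0), h2get k, hr1get, h1len, hr0len]
    simp only [pvPadd, List.getElem_map, List.getElem_range]
    by_cases hc : 1 ≤ k ∧ k ≤ p2.length
    · rw [if_pos (by omega), if_pos hc]
    · rw [if_neg (by omega), if_neg hc]

lemma mergeA_eq_pvPadd (p1 p2 : List Int) : mergeListsA p1 p2 = pvPadd p1 p2 :=
  mergeA_loops_eq_pvPadd p1 p2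

-- ---- splitting the family {t ⊆ insert v s | P t} on membership of v ----

lemma pow_insert_filter (v : ℕ) (s : Finset ℕ) (Q : Finset ℕ → Prop) [DecidablePred Q] :
    (insert v s).powerset.filter Q
      = s.powerset.filter Q ∪ (s.powerset.filter (fun t => Q (insert v t))).image (insert v) := by
  rw [Finset.powerset_insert, Finset.filter_union, Finset.filter_image]

lemma insert_injOn (v : ℕ) (s : Finset ℕ) (hv : v ∉ s) (A : Finset (Finset ℕ))
    (hA : ∀ t ∈ A, t ⊆ s) : Set.InjOn (insert v) (A : Set (Finset ℕ)) := by
  intro t ht t' ht' h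
  have h1 : v ∉ t := fun hm => hv (hA t ht hm)
  have h2 : v ∉ t' := fun hm => hv (hA t' ht' hm)
  rw [← Finset.erase_insert h1, ← Finset.erase_insert h2, h]

lemma card_pow_insert_filter (v : ℕ) (s : Finset ℕ) (hv : v ∉ s)
    (Q : Finset ℕ → Prop) [DecidablePred Q] :
    ((insert v s).powerset.filter Q).card
      = (s.powerset.filter Q).card + (s.powerset.filter (fun t => Q (insert v t))).card := by
  rw [pow_insert_filter v s Q, Finset.card_union_of_disjoint, Finset.card_image_of_injOn]
  · exact insert_injOn v s hv _ (fun t ht => Finset.mem_powerset.mp (Finset.mem_filter.mp ht).1)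
  · rw [Finset.disjoint_left]
    intro t ht htim
    obtain ⟨t', ht', rfl⟩ := Finset.mem_image.mp htim
    have hsub : t' ⊆ s := Finset.mem_powerset.mp (Finset.mem_filter.mp ht').1
    have : insert v t' ⊆ s := Finset.mem_powerset.mp (Finset.mem_filter.mp ht).1
    exact hv (this (Finset.mem_insert_self v t'))

lemma cnt_split (v : ℕ) (s : Finset ℕ) (hv : v ∉ s) (P : Finset ℕ → Bool) (k : ℕ) :
    cntB (insert v s) P k
      = cntB s P k + (if k = 0 then 0 else cntB s (fun t => P (insert v t)) (k - 1)) := by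
  unfold cntB
  rw [card_pow_insert_filter v s hv]
  congr 1
  have hcard : ∀ t ∈ s.powerset, (insert v t).card = t.card + 1 := by
    intro t ht
    exact Finset.card_insert_of_notMem (fun hm => hv (Finset.mem_powerset.mp ht hm))
  by_cases hk : k = 0
  · subst hk
    rw [if_pos rfl, Finset.card_eq_zero]
    apply Finset.filter_eq_empty_iff.mpr
    intro t ht
    rintro ⟨h1, h2⟩
    have := hcard t ht
    omega
  · rw [if_neg hk]
    congr 1
    apply Finset.filter_congr
    intro t ht
    rw [hcard t ht]
    constructor
    · rintro ⟨ha, hb⟩; exact ⟨ha, by omega⟩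
    · rintro ⟨ha, hb⟩; exact ⟨ha, by omega⟩

lemma max_split (v : ℕ) (s : Finset ℕ) (hv : v ∉ s) (P : Finset ℕ → Bool)
    (h1 : P {v} = true) :
    maxB (insert v s) P = max (maxB s P) (maxB s (fun t => P (insert v t)) + 1) := by
  unfold maxB
  rw [pow_insert_filter v s, Finset.sup_union, Finset.sup_image]
  congr 1
  have hne : (s.powerset.filter (fun t => P (insert v t) = true)).Nonempty := by
    refine ⟨∅, Finset.mem_filter.mpr ⟨Finset.mem_powerset.mpr (Finset.empty_subset s), ?_⟩⟩
    simpa using h1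
  have hcomp : (s.powerset.filter (fun t => P (insert v t) = true)).sup (Finset.card ∘ insert v)
      = (s.powerset.filter (fun t => P (insert v t) = true)).sup (fun t => t.card + 1) := by
    apply Finset.sup_congr rfl
    intro t ht
    have ht' := Finset.mem_powerset.mp (Finset.mem_filter.mp ht).1
    simp only [Function.comp_apply]
    exact Finset.card_insert_of_notMem (fun hm => hv (ht' hm))
  rw [hcomp, ← Finset.sup_add hne Finset.card 1]

lemma cnt_gt_max (s : Finset ℕ) (P : Finset ℕ → Bool) (k : ℕ) (h : maxB s P < k) :
    cntB s P k = 0 := by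
  unfold cntB
  rw [Finset.card_eq_zero]
  apply Finset.filter_eq_empty_iff.mpr
  intro t ht
  rintro ⟨h1, h2⟩
  have : t.card ≤ maxB s P := Finset.le_sup (Finset.mem_filter.mpr ⟨ht, h1⟩)
  omega

lemma hist_length (s : Finset ℕ) (P : Finset ℕ → Bool) :
    (histB s P).length = maxB s P + 1 := by simp [histB]

lemma hist_getD (s : Finset ℕ) (P : Finset ℕ → Bool) (k : ℕ) :
    (histB s P).getD k 0 = (cntB s P k : ℤ) := by
  by_cases hk : k < maxB s P + 1
  · rw [List.getD_eq_getElem _ _ (by simpa [hist_length] using hk)]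
    simp [histB]
  · rw [List.getD_eq_default _ _ (by simp [hist_length]; omega)]
    rw [cnt_gt_max s P k (by omega)]
    simp

lemma hist_congr (s s' : Finset ℕ) (P P' : Finset ℕ → Bool)
    (h : ∀ t, (t ∈ s.powerset ∧ P t = true) ↔ (t ∈ s'.powerset ∧ P' t = true)) :
    histB s P = histB s' P' := by
  have key : s.powerset.filter (fun t => P t = true) = s'.powerset.filter (fun t => P' t = true) := by
    apply Finset.ext
    intro t
    simp only [Finset.mem_filter]
    exact h t
  have hm : maxB s P = maxB s' P' := by unfold maxB; rw [key]
  have hc : ∀ k, cntB s P k = cntB s' P' k := by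
    intro k; unfold cntB; rw [← Finset.filter_filter, ← Finset.filter_filter, key]
  unfold histB
  rw [hm]
  congr 1
  funext k
  rw [hc k]

lemma hist_empty (P : Finset ℕ → Bool) (h : P ∅ = true) : histB ∅ P = [1] := by
  have hm : maxB ∅ P = 0 := by
    unfold maxB
    rw [Finset.powerset_empty, Finset.filter_singleton, if_pos h]
    simp
  have hc : cntB ∅ P 0 = 1 := by
    unfold cntB
    rw [Finset.powerset_empty, Finset.filter_singleton, if_pos (by simp [h])]
    simp
  unfold histB
  rw [hm]
  simp [List.range_one, hc]

lemma hist_insert (v : ℕ) (s : Finset ℕ) (hv : v ∉ s) (P : Finset ℕ → Bool)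
    (h1 : P {v} = true) :
    histB (insert v s) P = pvPadd (histB s P) (histB s (fun t => P (insert v t))) := by
  have hlenpp : ∀ (a b : List ℤ), (pvPadd a b).length = max a.length (b.length + 1) := by
    intro a b; simp [pvPadd]
  apply List.ext_getElem
  · rw [hist_length, hlenpp]
    simp only [hist_length]
    rw [max_split v s hv P h1]
    omega
  · intro k hk1 hk2
    rw [hlenpp] at hk2
    rw [List.getElem_eq_getD (fallback := 0), List.getElem_eq_getD (fallback := 0)]
    rw [hist_getD, cnt_split v s hv P k]
    have hppad : ∀ j, j < max (histB s P).length ((histB s (fun t => P (insert v t))).length + 1) →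
        (pvPadd (histB s P) (histB s (fun t => P (insert v t)))).getD j 0
        = ((cntB s P j : ℤ) + if 1 ≤ j ∧ j ≤ maxB s (fun t => P (insert v t)) + 1 then
              (cntB s (fun t => P (insert v t)) (j-1) : ℤ) else 0) := by
      intro j hj
      unfold pvPadd
      rw [List.getD_eq_getElem _ _ (by simpa using hj)]
      simp only [List.getElem_map, List.getElem_range]
      rw [hist_getD, hist_getD, hist_length]
    rw [hppad k hk2]
    push_cast
    by_cases hk0 : k = 0
    · subst hk0
      rw [if_pos rfl, if_neg (by omega)]
    · rw [if_neg hk0]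
      by_cases hkq : 1 ≤ k ∧ k ≤ maxB s (fun t => P (insert v t)) + 1
      · rw [if_pos hkq]
      · rw [if_neg hkq]
        rw [cnt_gt_max s _ (k-1) (by omega)]
        simp

lemma hist_insert_nofly (v : ℕ) (s : Finset ℕ) (hv : v ∉ s) (P : Finset ℕ → Bool)
    (hnone : ∀ t ∈ s.powerset, P (insert v t) = false) :
    histB (insert v s) P = histB s P := by
  have hm : maxB (insert v s) P = maxB s P := by
    unfold maxB
    rw [pow_insert_filter v s]
    have : s.powerset.filter (fun t => P (insert v t) = true) = ∅ := by
      apply Finset.filter_eq_empty_iff.mpr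
      intro t ht hp
      rw [hnone t ht] at hp
      exact Bool.false_ne_true hp
    rw [this]
    simp
  have hc : ∀ k, cntB (insert v s) P k = cntB s P k := by
    intro k
    unfold cntB
    rw [card_pow_insert_filter v s hv]
    have : s.powerset.filter (fun t => P (insert v t) = true ∧ (insert v t).card = k) = ∅ := by
      apply Finset.filter_eq_empty_iff.mpr
      intro t ht
      rintro ⟨hp, _⟩
      rw [hnone t ht] at hp
      exact Bool.false_ne_true hp
    rw [this]
    simp
  unfold histB
  rw [hm]
  congr 1
  funext k
  rw [hc k]

-- ---- port A computes the independence polynomial ----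

lemma mem_adjA (c3 : List (List Int)) (v u : ℕ) :
    u ∈ adjA c3 v ↔ (u < c3.length ∧ AdjB c3 v u = true) := by
  unfold adjA AdjB
  rw [List.mem_filter, List.mem_range]

lemma IndB_singleton (c3 : List (List Int)) (v : ℕ) : IndB c3 {v} = true := by
  simp [IndB, AdjB_self]

lemma solveA_eq (c3 : List (List Int)) (verts : List ℕ)
    (hn : verts.Nodup) (hm : ∀ u ∈ verts, u < c3.length) :
    solveA (adjA c3) verts = histB verts.toFinset (IndB c3) := by
  generalize hfuel : verts.length = fuel
  induction fuel using Nat.strong_induction_on generalizing verts with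
  | _ fuel ih =>
  match verts, hn, hm, hfuel with
  | [], _, _, hfuel =>
    rw [solveA, List.toFinset_nil]
    exact (hist_empty _ (by simp [IndB])).symm
  | w :: ws, hn, hm, hfuel =>
    have hvmem : pivotA (adjA c3) w ws ∈ w :: ws := pivotA_mem (adjA c3) w ws
    set v := pivotA (adjA c3) w ws with hv
    set s := (w :: ws).toFinset with hs
    have hvs : v ∈ s := List.mem_toFinset.mpr hvmem
    set l1 := (w :: ws).filter (fun u => u != v) with hl1
    set l2 := (w :: ws).filter (fun u =>
        !((adjA c3 v).filter (fun j => (w :: ws).contains j)).contains u && (u != v)) with hl2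
    have hml : ∀ u ∈ w :: ws, u < c3.length := hm
    have h1 : solveA (adjA c3) l1 = histB l1.toFinset (IndB c3) := by
      apply ih l1.length ?_ l1 (hn.filter _) (fun u hu => hml u (List.mem_of_mem_filter hu)) rfl
      rw [← hfuel, hl1]
      apply List.length_filter_lt_length_iff_exists.mpr
      exact ⟨v, hvmem, by simp⟩
    have h2 : solveA (adjA c3) l2 = histB l2.toFinset (IndB c3) := by
      apply ih l2.length ?_ l2 (hn.filter _) (fun u hu => hml u (List.mem_of_mem_filter hu)) rfl
      rw [← hfuel, hl2]
      apply List.length_filter_lt_length_iff_exists.mpr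
      exact ⟨v, hvmem, by simp⟩
    have hL1 : l1.toFinset = s.erase v := by
      apply Finset.ext
      intro u
      rw [Finset.mem_erase, hl1, List.mem_toFinset, List.mem_filter, hs, List.mem_toFinset]
      simp only [bne_iff_ne, ne_eq]
      tauto
    have hL2mem : ∀ u, u ∈ l2.toFinset ↔ (u ∈ s ∧ u ≠ v ∧ AdjB c3 v u = false) := by
      intro u
      rw [hl2, List.mem_toFinset, List.mem_filter, hs, List.mem_toFinset]
      simp only [Bool.and_eq_true, Bool.not_eq_true', bne_iff_ne, ne_eq,
        List.contains_eq_mem, List.mem_filter, decide_eq_false_iff_not]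
      constructor
      · rintro ⟨hu, hnb, hne⟩
        refine ⟨hu, hne, ?_⟩
        by_contra hadj
        rw [Bool.not_eq_false] at hadj
        exact hnb ⟨(mem_adjA c3 v u).mpr ⟨hml u hu, hadj⟩, by simpa using hu⟩
      · rintro ⟨hu, hne, hadj⟩
        refine ⟨hu, ?_, hne⟩
        rintro ⟨ha, _⟩
        rw [((mem_adjA c3 v u).mp ha).2] at hadj
        simp at hadj

    rw [solveA, ← hv, ← hl1, ← hl2, mergeA_eq_pvPadd, h1, h2]
    rw [← Finset.insert_erase hvs, hist_insert v (s.erase v) (Finset.notMem_erase v s) _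
      (IndB_singleton c3 v), hL1]
    congr 1
    apply hist_congr
    intro t
    rw [IndB_insert]
    constructor
    · rintro ⟨ht, hind⟩
      have hsub : t ⊆ s.erase v := by
        intro u hu
        have := (hL2mem u).mp ((Finset.mem_powerset.mp ht) hu)
        exact Finset.mem_erase.mpr ⟨this.2.1, this.1⟩
      refine ⟨Finset.mem_powerset.mpr hsub, ?_⟩
      simp only [Bool.and_eq_true, decide_eq_true_eq]
      refine ⟨hind, fun u hu => ?_⟩
      exact ((hL2mem u).mp ((Finset.mem_powerset.mp ht) hu)).2.2
    · rintro ⟨ht, hp⟩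
      simp only [Bool.and_eq_true, decide_eq_true_eq] at hp
      obtain ⟨hind, hadj⟩ := hp
      refine ⟨Finset.mem_powerset.mpr (fun u hu => ?_), hind⟩
      have hue := Finset.mem_erase.mp ((Finset.mem_powerset.mp ht) hu)
      exact (hL2mem u).mpr ⟨hue.2, hue.1, hadj u hu⟩

-- ---- port B computes the independence polynomial ----

lemma mem_nbrsB (c3 : List (List Int)) (i u : ℕ) :
    u ∈ nbrsB c3 i ↔ (u < c3.length ∧ i < u ∧ AdjB c3 i u = true) := by
  unfold nbrsB AdjB
  rw [PySem.Set.mem_ofList, List.mem_filter, List.mem_range]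
  simp only [Bool.and_eq_true, decide_eq_true_eq, bne_iff_ne, ne_eq]
  constructor
  · rintro ⟨h1, h2, h3⟩; exact ⟨h1, h2, by omega, h3⟩
  · rintro ⟨h1, h2, _, h3⟩; exact ⟨h1, h2, h3⟩

lemma polyB_eq (c3 : List (List Int)) (i : ℕ) (blocked : List ℕ) (him : i ≤ c3.length) :
    polyB (nbrsB c3) c3.length i blocked
      = histB (Finset.Ico i c3.length)
          (fun t => IndB c3 t && decide (∀ u ∈ t, u ∉ blocked)) := by
  generalize hfuel : c3.length - i = fuel
  induction fuel generalizing i blocked with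
  | zero =>
    rw [polyB, if_pos (by omega)]
    rw [show i = c3.length by omega, Finset.Ico_self]
    refine (hist_empty _ ?_).symm
    simp [IndB]
  | succ n ih =>
    have hi : i < c3.length := by omega
    rw [polyB, if_neg (by omega)]
    have hnotmem : i ∉ Finset.Ico (i+1) c3.length := by simp
    have hIco : insert i (Finset.Ico (i+1) c3.length) = Finset.Ico i c3.length :=
      Finset.insert_Ico_add_one_left_eq_Ico hi
    have e1 : polyB (nbrsB c3) c3.length (i+1) (PySem.Set.diff blocked (PySem.Set.ofList [i]))
        = histB (Finset.Ico (i+1) c3.length)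
            (fun t => IndB c3 t && decide (∀ u ∈ t, u ∉ blocked)) := by
      rw [ih (i+1) _ (by omega) (by omega)]
      apply hist_congr
      intro t
      constructor <;> rintro ⟨ht, hp⟩ <;> refine ⟨ht, ?_⟩ <;>
        simp only [Bool.and_eq_true, decide_eq_true_eq] at hp ⊢ <;>
        obtain ⟨hind, hbl⟩ := hp <;> refine ⟨hind, fun u hu => ?_⟩ <;>
        have hui : i + 1 ≤ u := (Finset.mem_Ico.mp ((Finset.mem_powerset.mp ht) hu)).1
      · intro hub
        exact (hbl u hu) ((PySem.Set.mem_diff blocked (PySem.Set.ofList [i]) u).mpr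
          ⟨hub, by simp [PySem.Set.mem_ofList]; omega⟩)
      · intro hub
        exact (hbl u hu) (((PySem.Set.mem_diff blocked (PySem.Set.ofList [i]) u).mp hub).1)
    by_cases hib : PySem.Set.contains blocked i = true
    · rw [if_pos hib]
      have hibm : i ∈ blocked := by simpa using hib
      rw [e1, ← hIco]
      refine (hist_insert_nofly i _ hnotmem _ ?_).symm
      intro t _
      have hd : decide (∀ u ∈ insert i t, u ∉ blocked) = false :=
        decide_eq_false (fun h => (h i (Finset.mem_insert_self i t)) hibm)
      rw [hd, Bool.and_false]
    · rw [if_neg hib]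
      have hibm : i ∉ blocked := by simpa using hib
      have hP1 : (IndB c3 {i} && decide (∀ u ∈ ({i} : Finset ℕ), u ∉ blocked)) = true := by
        simp only [Bool.and_eq_true, decide_eq_true_eq, Finset.mem_singleton]
        constructor
        · simp [IndB, AdjB_self]
        · rintro u rfl; exact hibm
      rw [← hIco, hist_insert i _ hnotmem _ hP1, e1]
      congr 1
      rw [ih (i+1) _ (by omega) (by omega)]
      apply hist_congr
      intro t
      constructor <;> rintro ⟨ht, hp⟩ <;> refine ⟨ht, ?_⟩ <;>
        simp only [Bool.and_eq_true, decide_eq_true_eq, IndB_insert, Finset.mem_insert] at hp ⊢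
      · obtain ⟨hind, hbl⟩ := hp
        have hadj : ∀ u ∈ t, AdjB c3 i u = false := by
          intro u hu
          by_contra hne
          have hut := Finset.mem_Ico.mp ((Finset.mem_powerset.mp ht) hu)
          exact (hbl u hu) ((PySem.Set.mem_union blocked (nbrsB c3 i) u).mpr
            (Or.inr ((mem_nbrsB c3 i u).mpr ⟨hut.2, by omega, by simpa using hne⟩)))
        refine ⟨⟨hind, hadj⟩, ?_⟩
        rintro u (rfl | hu)
        · exact hibm
        · intro hub
          exact (hbl u hu) ((PySem.Set.mem_union blocked (nbrsB c3 i) u).mpr (Or.inl hub))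
      · obtain ⟨⟨hind, hadj⟩, hbl⟩ := hp
        refine ⟨hind, fun u hu hub => ?_⟩
        rcases (PySem.Set.mem_union blocked (nbrsB c3 i) u).mp hub with h | h
        · exact (hbl u (Or.inr hu)) h
        · have := (mem_nbrsB c3 i u).mp h
          rw [hadj u hu] at this
          exact absurd this.2.2 Bool.false_ne_true

-- ===== VERDICT (by name: the statement is the Claim_ definition above) =====
theorem omega3_poly_spec : Claim_equal_omega3_poly := by
  intro c3 _
  unfold Spec_omega3_poly omega3_poly omega3_poly_alt
  by_cases h : c3.length = 0
  · rw [if_pos h, h, polyB, if_pos (Nat.le_refl 0)]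
  · rw [if_neg h, solveA_eq c3 (List.range c3.length) List.nodup_range (by simp),
      polyB_eq c3 0 [] (by omega), List.toFinset_range, Finset.range_eq_Ico]
    apply hist_congr
    intro t
    constructor <;> rintro ⟨ht, hp⟩ <;> refine ⟨ht, ?_⟩
    · simp only [Bool.and_eq_true]
      exact ⟨hp, by simp⟩
    · simp only [Bool.and_eq_true] at hp
      exact hp.1
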